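-- pv_equiv track=rewrite | github.com/lewis6991/tcl-ls | src/tcl_lsp/analysis/flow/variables.py | _switch_pattern_exact_value
-- ===== SOURCE A (Python) =====
-- def _switch_pattern_exact_value(pattern: str | None, match_mode: str) -> str | None:
--     if pattern is None or pattern == 'default':
--         return None
--     if match_mode == 'exact':
--         return pattern
--     if match_mode == 'glob':
--         if any(char in pattern for char in '*?[]\\'):
--             return None
--         return pattern
--     if match_mode == 'regexp':
--         if any(char in pattern for char in '.^$*+?()[]{}|\\'):
--             return None
--         return pattern
--     return None
-- ===== SOURCE B (Python) =====
-- _GLOB_SPECIALS = '*?[]\\'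
-- _REGEXP_SPECIALS = '.^$*+?()[]{}|\\'
--
-- # Per-character bitmask table: bit 1 = kills glob, bit 2 = kills regexp.
-- _CHAR_MASK = {}
-- for _c in _GLOB_SPECIALS:
--     _CHAR_MASK[_c] = _CHAR_MASK.get(_c, 0) | 1
-- for _c in _REGEXP_SPECIALS:
--     _CHAR_MASK[_c] = _CHAR_MASK.get(_c, 0) | 2
--
-- _MODE_BIT = {'exact': 0, 'glob': 1, 'regexp': 2}
--
--
-- def _switch_pattern_exact_value(pattern, match_mode):
--     if pattern is None or pattern == 'default':
--         return None
--     bit = _MODE_BIT.get(match_mode)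
--     if bit is None:
--         return None
--     mask = 0
--     for c in pattern:
--         mask |= _CHAR_MASK.get(c, 0)
--     return None if mask & bit else pattern
-- ===== Notes on version B (the rewrite author's own statement) =====
-- stated objective: alternative
-- what changed: Replaces the per-mode branches that each scan a forbidden-character string against the pattern by a single pass over the pattern that ORs a precomputed per-character bitmask (bit1 = glob-special, bit2 = regexp-special) into an accumulator, then tests the mode's bit arithmetically.
import Mathlib
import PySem

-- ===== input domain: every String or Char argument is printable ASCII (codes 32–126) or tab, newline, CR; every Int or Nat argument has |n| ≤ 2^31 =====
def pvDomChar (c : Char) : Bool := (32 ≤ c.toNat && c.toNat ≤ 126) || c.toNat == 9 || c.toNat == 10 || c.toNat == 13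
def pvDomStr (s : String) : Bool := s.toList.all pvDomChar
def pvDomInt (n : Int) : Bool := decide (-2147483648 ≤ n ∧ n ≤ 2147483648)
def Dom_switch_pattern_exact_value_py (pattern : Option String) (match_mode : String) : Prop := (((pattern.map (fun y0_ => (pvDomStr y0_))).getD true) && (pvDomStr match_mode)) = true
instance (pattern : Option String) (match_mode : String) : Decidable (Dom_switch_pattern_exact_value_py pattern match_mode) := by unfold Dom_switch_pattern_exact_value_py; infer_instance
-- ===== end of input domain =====

-- B replaces the per-mode forbidden-character scans by one pass over the pattern that
-- ORs a precomputed per-character bitmask into an accumulator and tests the mode's bit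
-- arithmetically at the end (objective: alternative).


-- ===== PORT A =====
-- 'char in pattern' for a single character is exactly char-list membership
def switch_pattern_exact_value_py (pattern : Option String) (match_mode : String) : Option String :=
  match pattern with
  | none => none
  | some p =>
    if p == "default" then none
    else if match_mode == "exact" then some p
    else if match_mode == "glob" then
      if "*?[]\\".toList.any (fun c => p.toList.contains c) then none else some p
    else if match_mode == "regexp" then
      if ".^$*+?()[]{}|\\".toList.any (fun c => p.toList.contains c) then none else some p
    else none

-- ===== PORT B =====
-- the module-level _CHAR_MASK table, built exactly as Source B's two for-loops build it
def pvCharMask : PySem.Dict Char Nat :=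
  ".^$*+?()[]{}|\\".toList.foldl
    (fun d c => PySem.Dict.insert d c (PySem.Dict.getD d c 0 ||| 2))
    ("*?[]\\".toList.foldl
      (fun d c => PySem.Dict.insert d c (PySem.Dict.getD d c 0 ||| 1))
      (PySem.Dict.ofList []))

-- the module-level _MODE_BIT table
def pvModeBit : PySem.Dict String Nat :=
  PySem.Dict.ofList [("exact", 0), ("glob", 1), ("regexp", 2)]

def switch_pattern_exact_value_py_alt (pattern : Option String) (match_mode : String) : Option String :=
  match pattern with
  | none => none
  | some p =>
    if p == "default" then none
    else
      match PySem.Dict.get? pvModeBit match_mode with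
      | none => none
      | some bit =>
        if (p.toList.foldl (fun m c => m ||| PySem.Dict.getD pvCharMask c 0) 0) &&& bit ≠ 0
        then none else some p

-- ===== PRECONDITION & SPEC =====
def Spec_switch_pattern_exact_value_py (pattern : Option String) (match_mode : String) (out : Option String) : Prop := out = switch_pattern_exact_value_py_alt pattern match_mode
instance (pattern : Option String) (match_mode : String) (out : Option String) : Decidable (Spec_switch_pattern_exact_value_py pattern match_mode out) := by unfold Spec_switch_pattern_exact_value_py; infer_instance

-- ===== CLAIM (what is proved, stated in full; the proofs are below) =====
def Claim_equal_switch_pattern_exact_value_py : Prop := ∀ (pattern : Option String) (match_mode : String), Dom_switch_pattern_exact_value_py pattern match_mode → Spec_switch_pattern_exact_value_py pattern match_mode (switch_pattern_exact_value_py pattern match_mode)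

-- ===== LEMMAS AND PROOFS =====
theorem pvModeBit_get? (k : String) :
    PySem.Dict.get? pvModeBit k =
      if "exact" == k then some 0 else
      if "glob" == k then some 1 else
      if "regexp" == k then some 2 else none := by
  have h : pvModeBit = PySem.Dict.mk [("exact", 0), ("glob", 1), ("regexp", 2)] := rfl
  rw [h]; simp only [PySem.Dict.get?_mk_cons]; rfl

theorem pvCharMask_eq : pvCharMask = PySem.Dict.mk
    [('*',3),('?',3),('[',3),(']',3),('\\',3),('.',2),('^',2),('$',2),('+',2),('(',2),(')',2),('{',2),('}',2),('|',2)] := by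
  decide

theorem pvCharMask_get? (c : Char) :
    PySem.Dict.get? pvCharMask c =
      if '*' == c then some 3 else if '?' == c then some 3 else if '[' == c then some 3 else
      if ']' == c then some 3 else if '\\' == c then some 3 else if '.' == c then some 2 else
      if '^' == c then some 2 else if '$' == c then some 2 else if '+' == c then some 2 else
      if '(' == c then some 2 else if ')' == c then some 2 else if '{' == c then some 2 else
      if '}' == c then some 2 else if '|' == c then some 2 else none := by
  rw [pvCharMask_eq]
  simp only [PySem.Dict.get?_mk_cons]
  rfl

theorem pvCharMask_getD_not_mem (c : Char)
    (h : c ∉ ['*','?','[',']','\\','.','^','$','+','(',')','{','}','|']) :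
    PySem.Dict.getD pvCharMask c 0 = 0 := by
  simp only [List.mem_cons, List.not_mem_nil, or_false, not_or] at h
  obtain ⟨n1,n2,n3,n4,n5,n6,n7,n8,n9,n10,n11,n12,n13,n14⟩ := h
  have h0 : PySem.Dict.getD pvCharMask c 0 = (PySem.Dict.get? pvCharMask c).getD 0 := rfl
  rw [h0, pvCharMask_get?]
  simp only [beq_iff_eq]
  rw [if_neg (Ne.symm n1), if_neg (Ne.symm n2), if_neg (Ne.symm n3), if_neg (Ne.symm n4),
      if_neg (Ne.symm n5), if_neg (Ne.symm n6), if_neg (Ne.symm n7), if_neg (Ne.symm n8),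
      if_neg (Ne.symm n9), if_neg (Ne.symm n10), if_neg (Ne.symm n11), if_neg (Ne.symm n12),
      if_neg (Ne.symm n13), if_neg (Ne.symm n14)]
  rfl

theorem mask_bit1 (c : Char) :
    (PySem.Dict.getD pvCharMask c 0 &&& 1 ≠ 0) ↔ c ∈ "*?[]\\".toList := by
  by_cases h : c ∈ ['*','?','[',']','\\','.','^','$','+','(',')','{','}','|']
  · fin_cases h <;> decide
  · rw [pvCharMask_getD_not_mem c h]
    simp only [List.mem_cons, List.not_mem_nil, or_false, not_or] at h
    simp [h.1, h.2.1, h.2.2.1, h.2.2.2.1, h.2.2.2.2.1]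

theorem mask_bit2 (c : Char) :
    (PySem.Dict.getD pvCharMask c 0 &&& 2 ≠ 0) ↔ c ∈ ".^$*+?()[]{}|\\".toList := by
  by_cases h : c ∈ ['*','?','[',']','\\','.','^','$','+','(',')','{','}','|']
  · fin_cases h <;> decide
  · rw [pvCharMask_getD_not_mem c h]
    simp only [List.mem_cons, List.not_mem_nil, or_false, not_or] at h
    obtain ⟨n1,n2,n3,n4,n5,n6,n7,n8,n9,n10,n11,n12,n13,n14⟩ := h
    simp [n1,n2,n3,n4,n5,n6,n7,n8,n9,n10,n11,n12,n13,n14]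

theorem lor_eq_zero_nat (a b : Nat) : a ||| b = 0 ↔ a = 0 ∧ b = 0 := by
  constructor
  · intro h
    exact ⟨Nat.eq_zero_of_le_zero (h ▸ (Nat.left_le_or : a ≤ a ||| b)),
           Nat.eq_zero_of_le_zero (h ▸ (Nat.right_le_or : b ≤ a ||| b))⟩
  · rintro ⟨rfl, rfl⟩; rfl

theorem foldl_lor_bit (f : Char → Nat) (b : Nat) (l : List Char) (m : Nat) :
    ((l.foldl (fun a c => a ||| f c) m) &&& b ≠ 0) ↔
      (m &&& b ≠ 0 ∨ ∃ c ∈ l, f c &&& b ≠ 0) := by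
  induction l generalizing m with
  | nil => simp
  | cons c t ih =>
    simp only [List.foldl_cons, ih, List.mem_cons]
    constructor
    · rintro (h | h)
      · rw [Nat.and_or_distrib_right] at h
        by_cases h1 : m &&& b = 0
        · by_cases h2 : f c &&& b = 0
          · exact absurd (by rw [h1, h2]; rfl) h
          · exact Or.inr ⟨c, Or.inl rfl, h2⟩
        · exact Or.inl h1
      · obtain ⟨x, hx, hb⟩ := h; exact Or.inr ⟨x, Or.inr hx, hb⟩
    · rintro (h | ⟨x, (rfl | hx), hb⟩)
      · refine Or.inl ?_
        rw [Nat.and_or_distrib_right]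
        exact fun hz => h ((lor_eq_zero_nat _ _).mp hz).1
      · refine Or.inl ?_
        rw [Nat.and_or_distrib_right]
        exact fun hz => hb ((lor_eq_zero_nat _ _).mp hz).2
      · exact Or.inr ⟨x, hx, hb⟩

theorem any_swap (spec : List Char) (p : List Char) :
    (spec.any fun c => p.contains c) = true ↔ ∃ c ∈ p, c ∈ spec := by
  simp only [List.any_eq_true, List.contains_iff_mem]
  exact ⟨fun ⟨a, h1, h2⟩ => ⟨a, h2, h1⟩, fun ⟨a, h1, h2⟩ => ⟨a, h2, h1⟩⟩

theorem mask_cond (p : String) (b : Nat) (spec : List Char)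
    (hb : ∀ c : Char, (PySem.Dict.getD pvCharMask c 0 &&& b ≠ 0) ↔ c ∈ spec) :
    ((p.toList.foldl (fun m c => m ||| PySem.Dict.getD pvCharMask c 0) 0) &&& b ≠ 0) ↔
      (spec.any fun c => p.toList.contains c) = true := by
  rw [foldl_lor_bit, any_swap]
  simp only [Nat.zero_and, ne_eq, not_true_eq_false, false_or]
  simp only [ne_eq] at hb
  exact exists_congr fun c => and_congr_right fun _ => hb c

-- ===== VERDICT (by name: the statement is the Claim_ definition above) =====
theorem switch_pattern_exact_value_py_spec : Claim_equal_switch_pattern_exact_value_py := by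
  intro pattern match_mode _
  unfold Spec_switch_pattern_exact_value_py
  cases pattern with
  | none => rfl
  | some p =>
    by_cases hd : (p == "default") = true
    · cases he : PySem.Dict.get? pvModeBit match_mode with
      | none => simp [switch_pattern_exact_value_py, switch_pattern_exact_value_py_alt, hd]
      | some bit => simp [switch_pattern_exact_value_py, switch_pattern_exact_value_py_alt, hd]
    · by_cases he : match_mode = "exact"
      · subst he
        simp [switch_pattern_exact_value_py, switch_pattern_exact_value_py_alt, hd,
          pvModeBit_get?, Nat.and_zero]
      · by_cases hg : match_mode = "glob"
        · subst hg
          have hA : switch_pattern_exact_value_py (some p) "glob"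
              = if p == "default" then none
                else if ("*?[]\\".toList.any fun c => p.toList.contains c) then none
                else some p := rfl
          have hB : switch_pattern_exact_value_py_alt (some p) "glob"
              = if p == "default" then none
                else if (p.toList.foldl (fun m c => m ||| PySem.Dict.getD pvCharMask c 0) 0) &&& 1 ≠ 0
                then none else some p := rfl
          rw [hA, hB, if_neg hd, if_neg hd]
          have hc := mask_cond p 1 ("*?[]\\".toList) mask_bit1
          by_cases h : ("*?[]\\".toList.any fun c => p.toList.contains c) = true
          · rw [if_pos h, if_pos (hc.mpr h)]
          · rw [if_neg h, if_neg (fun hx => h (hc.mp hx))]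
        · by_cases hr : match_mode = "regexp"
          · subst hr
            have hA : switch_pattern_exact_value_py (some p) "regexp"
                = if p == "default" then none
                  else if (".^$*+?()[]{}|\\".toList.any fun c => p.toList.contains c) then none
                  else some p := rfl
            have hB : switch_pattern_exact_value_py_alt (some p) "regexp"
                = if p == "default" then none
                  else if (p.toList.foldl (fun m c => m ||| PySem.Dict.getD pvCharMask c 0) 0) &&& 2 ≠ 0
                  then none else some p := rfl
            rw [hA, hB, if_neg hd, if_neg hd]
            have hc := mask_cond p 2 (".^$*+?()[]{}|\\".toList) mask_bit2
            by_cases h : (".^$*+?()[]{}|\\".toList.any fun c => p.toList.contains c) = true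
            · rw [if_pos h, if_pos (hc.mpr h)]
            · rw [if_neg h, if_neg (fun hx => h (hc.mp hx))]
          · have hnone : PySem.Dict.get? pvModeBit match_mode = none := by
              rw [pvModeBit_get?,
                if_neg (by simp only [beq_iff_eq]; exact fun h => he h.symm),
                if_neg (by simp only [beq_iff_eq]; exact fun h => hg h.symm),
                if_neg (by simp only [beq_iff_eq]; exact fun h => hr h.symm)]
            simp [switch_pattern_exact_value_py, switch_pattern_exact_value_py_alt, hd, hnone,
              he, hg, hr]
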